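-- pv_equiv track=rewrite | github.com/neuroscout/neuroscout | scripts/fmri_hcp_fixed_patch.py | get_subs
-- ===== SOURCE A (Python) =====
-- def get_subs(subject_id, conds):
--     """ Generate substitutions """
--     subs = [('_subject_id_%s' % subject_id, '')]
--
--     for i in range(len(conds)):
--         subs.append(('_flameo%d/cope1.' % i, 'cope%02d.' % (i + 1)))
--         subs.append(('_flameo%d/varcope1.' % i, 'varcope%02d.' % (i + 1)))
--         subs.append(('_flameo%d/zstat1.' % i, 'zstat%02d.' % (i + 1)))
--         subs.append(('_flameo%d/tstat1.' % i, 'tstat%02d.' % (i + 1)))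
--         subs.append(('_flameo%d/res4d.' % i, 'res4d%02d.' % (i + 1)))
--         subs.append(('_warpall%d/cope1_warp.' % i,
--                      'cope%02d.' % (i + 1)))
--         subs.append(('_warpall%d/varcope1_warp.' % (len(conds) + i),
--                      'varcope%02d.' % (i + 1)))
--         subs.append(('_warpall%d/zstat1_warp.' % (2 * len(conds) + i),
--                      'zstat%02d.' % (i + 1)))
--         subs.append(('_warpall%d/cope1_trans.' % i,
--                      'cope%02d.' % (i + 1)))
--         subs.append(('_warpall%d/varcope1_trans.' % (len(conds) + i),
--                      'varcope%02d.' % (i + 1)))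
--         subs.append(('_warpall%d/zstat1_trans.' % (2 * len(conds) + i),
--                      'zstat%02d.' % (i + 1)))
--     return subs
-- ===== SOURCE B (Python) =====
-- def get_subs(subject_id, conds):
--     """ Generate substitutions """
--     n = len(conds)
--     idx = range(n)
--     # column-major construction: one full column per substitution template,
--     # then zip(*cols) interleaves them back into A's per-index order.
--     cols = [
--         [('_flameo%d/cope1.' % i, 'cope%02d.' % (i + 1)) for i in idx],
--         [('_flameo%d/varcope1.' % i, 'varcope%02d.' % (i + 1)) for i in idx],
--         [('_flameo%d/zstat1.' % i, 'zstat%02d.' % (i + 1)) for i in idx],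
--         [('_flameo%d/tstat1.' % i, 'tstat%02d.' % (i + 1)) for i in idx],
--         [('_flameo%d/res4d.' % i, 'res4d%02d.' % (i + 1)) for i in idx],
--         [('_warpall%d/cope1_warp.' % i, 'cope%02d.' % (i + 1)) for i in idx],
--         [('_warpall%d/varcope1_warp.' % (n + i), 'varcope%02d.' % (i + 1)) for i in idx],
--         [('_warpall%d/zstat1_warp.' % (2 * n + i), 'zstat%02d.' % (i + 1)) for i in idx],
--         [('_warpall%d/cope1_trans.' % i, 'cope%02d.' % (i + 1)) for i in idx],
--         [('_warpall%d/varcope1_trans.' % (n + i), 'varcope%02d.' % (i + 1)) for i in idx],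
--         [('_warpall%d/zstat1_trans.' % (2 * n + i), 'zstat%02d.' % (i + 1)) for i in idx],
--     ]
--     return [('_subject_id_%s' % subject_id, '')] + \
--         [pair for row in zip(*cols) for pair in row]
-- ===== Notes on version B (the rewrite author's own statement) =====
-- stated objective: alternative
-- what changed: Instead of A's row-by-row loop appending eleven pairs per index, B builds eleven complete columns (one list per substitution template over all indices) and interleaves them back into row order with zip(*cols); correct because flattening the transpose of column-major lists reproduces the row-major order.
import Mathlib
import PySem

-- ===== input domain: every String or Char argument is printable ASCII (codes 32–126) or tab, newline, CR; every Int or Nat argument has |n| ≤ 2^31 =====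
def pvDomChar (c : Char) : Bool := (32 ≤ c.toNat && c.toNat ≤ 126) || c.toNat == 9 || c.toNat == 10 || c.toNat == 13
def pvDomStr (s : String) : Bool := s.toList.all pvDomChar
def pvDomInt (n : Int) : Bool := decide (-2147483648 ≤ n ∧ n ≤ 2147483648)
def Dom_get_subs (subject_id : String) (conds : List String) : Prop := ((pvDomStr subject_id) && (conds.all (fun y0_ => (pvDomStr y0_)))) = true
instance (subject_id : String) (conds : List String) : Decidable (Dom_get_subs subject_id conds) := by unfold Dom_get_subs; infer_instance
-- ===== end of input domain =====

-- B builds one full column per substitution template and interleaves them with zip(*cols),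
-- instead of A's row-by-row append loop: an alternative, column-major construction.

-- shared helper: Python's '%02d' % n for n ≥ 0 (both sources use this format)
def pvFmt02 (n : Int) : String :=
  let s := PySem.Int.toStr n
  if s.length < 2 then "0" ++ s else s

-- ===== PORT A =====
def get_subs (subject_id : String) (conds : List String) : List (String × String) :=
  (PySem.List.pyRange 0 (conds.length : Int) 1).foldl
    (fun subs i =>
      subs ++
        [("_flameo" ++ PySem.Int.toStr i ++ "/cope1.", "cope" ++ pvFmt02 (i + 1) ++ "."),
         ("_flameo" ++ PySem.Int.toStr i ++ "/varcope1.", "varcope" ++ pvFmt02 (i + 1) ++ "."),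
         ("_flameo" ++ PySem.Int.toStr i ++ "/zstat1.", "zstat" ++ pvFmt02 (i + 1) ++ "."),
         ("_flameo" ++ PySem.Int.toStr i ++ "/tstat1.", "tstat" ++ pvFmt02 (i + 1) ++ "."),
         ("_flameo" ++ PySem.Int.toStr i ++ "/res4d.", "res4d" ++ pvFmt02 (i + 1) ++ "."),
         ("_warpall" ++ PySem.Int.toStr i ++ "/cope1_warp.", "cope" ++ pvFmt02 (i + 1) ++ "."),
         ("_warpall" ++ PySem.Int.toStr ((conds.length : Int) + i) ++ "/varcope1_warp.",
          "varcope" ++ pvFmt02 (i + 1) ++ "."),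
         ("_warpall" ++ PySem.Int.toStr (2 * (conds.length : Int) + i) ++ "/zstat1_warp.",
          "zstat" ++ pvFmt02 (i + 1) ++ "."),
         ("_warpall" ++ PySem.Int.toStr i ++ "/cope1_trans.", "cope" ++ pvFmt02 (i + 1) ++ "."),
         ("_warpall" ++ PySem.Int.toStr ((conds.length : Int) + i) ++ "/varcope1_trans.",
          "varcope" ++ pvFmt02 (i + 1) ++ "."),
         ("_warpall" ++ PySem.Int.toStr (2 * (conds.length : Int) + i) ++ "/zstat1_trans.",
          "zstat" ++ pvFmt02 (i + 1) ++ ".")])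
    [("_subject_id_" ++ subject_id, "")]

-- ===== PORT B =====
-- Python's zip(*cols): emit the list of heads while every column is nonempty; exact
-- for nonempty cols (B always passes 11 columns).
def pvZipStar {α : Type} (cols : List (List α)) : List (List α) :=
  if h : cols ≠ [] ∧ ∀ l ∈ cols, l ≠ [] then
    (cols.filterMap List.head?) :: pvZipStar (cols.map List.tail)
  else []
termination_by (cols.map List.length).sum
decreasing_by
  obtain ⟨hne, hall⟩ := h
  cases cols with
  | nil => exact absurd rfl hne
  | cons c cs =>
    simp only [List.map_cons, List.sum_cons]
    have h1 : c.tail.length < c.length := by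
      have hc := hall c (by simp)
      cases c with
      | nil => exact absurd rfl hc
      | cons a l => simp
    have h2 : ((cs.map List.tail).map List.length).sum ≤ (cs.map List.length).sum := by
      rw [List.map_map]
      exact List.sum_le_sum (fun l _ => by simp [List.length_tail])
    omega

-- the 11 column generators of B, each closing over n = len(conds)
def pvColFns (n : Int) : List (Int → String × String) :=
  [fun i => ("_flameo" ++ PySem.Int.toStr i ++ "/cope1.", "cope" ++ pvFmt02 (i + 1) ++ "."),
   fun i => ("_flameo" ++ PySem.Int.toStr i ++ "/varcope1.", "varcope" ++ pvFmt02 (i + 1) ++ "."),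
   fun i => ("_flameo" ++ PySem.Int.toStr i ++ "/zstat1.", "zstat" ++ pvFmt02 (i + 1) ++ "."),
   fun i => ("_flameo" ++ PySem.Int.toStr i ++ "/tstat1.", "tstat" ++ pvFmt02 (i + 1) ++ "."),
   fun i => ("_flameo" ++ PySem.Int.toStr i ++ "/res4d.", "res4d" ++ pvFmt02 (i + 1) ++ "."),
   fun i => ("_warpall" ++ PySem.Int.toStr i ++ "/cope1_warp.", "cope" ++ pvFmt02 (i + 1) ++ "."),
   fun i => ("_warpall" ++ PySem.Int.toStr (n + i) ++ "/varcope1_warp.", "varcope" ++ pvFmt02 (i + 1) ++ "."),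
   fun i => ("_warpall" ++ PySem.Int.toStr (2 * n + i) ++ "/zstat1_warp.", "zstat" ++ pvFmt02 (i + 1) ++ "."),
   fun i => ("_warpall" ++ PySem.Int.toStr i ++ "/cope1_trans.", "cope" ++ pvFmt02 (i + 1) ++ "."),
   fun i => ("_warpall" ++ PySem.Int.toStr (n + i) ++ "/varcope1_trans.", "varcope" ++ pvFmt02 (i + 1) ++ "."),
   fun i => ("_warpall" ++ PySem.Int.toStr (2 * n + i) ++ "/zstat1_trans.", "zstat" ++ pvFmt02 (i + 1) ++ ".")]

def get_subs_alt (subject_id : String) (conds : List String) : List (String × String) :=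
  let n : Int := (conds.length : Int)
  let idx := PySem.List.pyRange 0 n 1
  let cols := (pvColFns n).map (fun f => idx.map f)
  ("_subject_id_" ++ subject_id, "") :: (pvZipStar cols).flatten

-- ===== PRECONDITION & SPEC =====
def Spec_get_subs (subject_id : String) (conds : List String) (out : List (String × String)) : Prop := out = get_subs_alt subject_id conds
instance (subject_id : String) (conds : List String) (out : List (String × String)) : Decidable (Spec_get_subs subject_id conds out) := by unfold Spec_get_subs; infer_instance

-- ===== CLAIM (what is proved, stated in full; the proofs are below) =====
def Claim_equal_get_subs : Prop := ∀ (subject_id : String) (conds : List String), Dom_get_subs subject_id conds → Spec_get_subs subject_id conds (get_subs subject_id conds)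

-- ===== LEMMAS AND PROOFS =====

-- zip-of-columns-built-from-one-index-list, flattened, is the row-major flatMap
theorem pvZipStar_map_flatten {ι α : Type} (r : List ι) (fs : List (ι → α)) (hfs : fs ≠ []) :
    (pvZipStar (fs.map (fun f => r.map f))).flatten = r.flatMap (fun i => fs.map (fun f => f i)) := by
  induction r with
  | nil =>
    rw [pvZipStar, dif_neg]
    · simp
    · intro hcon
      obtain ⟨f, hf⟩ := List.exists_mem_of_ne_nil fs hfs
      exact hcon.2 [] (List.mem_map.mpr ⟨f, hf, rfl⟩) rfl
  | cons i r' ih =>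
    rw [pvZipStar, dif_pos]
    · simp only [List.map_map, Function.comp_def, List.map_cons, List.tail_cons,
        List.filterMap_map, List.head?_cons, List.flatten_cons, List.flatMap_cons]
      rw [show (fun x : ι → α => some (x i)) = (some ∘ (fun f : ι → α => f i)) from rfl,
        List.filterMap_eq_map, ih]
    · constructor
      · simpa using hfs
      · intro l hl
        simp only [List.mem_map] at hl
        obtain ⟨f, -, rfl⟩ := hl
        simp

-- ===== VERDICT (by name: the statement is the Claim_ definition above) =====
theorem get_subs_spec : Claim_equal_get_subs := by
  intro subject_id conds _
  simp only [Spec_get_subs, get_subs, get_subs_alt]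
  rw [PySem.List.foldl_append_eq_flatMap]
  rw [pvZipStar_map_flatten _ _ (by simp [pvColFns])]
  simp only [List.singleton_append, List.cons.injEq, true_and]
  exact List.flatMap_congr (fun i _ => by simp [pvColFns])
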